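-- pv_equiv track=rewrite | github.com/Neural-Symbolic-Image-Labeling/Rapid | FOIL/model_label/bird_foil_for_vscode_old.py | get_new_total_list1
-- ===== SOURCE A (Python) =====
-- import math,re,copy,json,time,random
--
-- def get_new_total_list1(result_list,total_list):        #use for outer loop
--     del_number_hd=[]
--     new_total=copy.deepcopy(total_list)           #use deepcopy for not changing the total_list
--     for clauses_list in result_list:
--         for image_number,image in enumerate(total_list):
--             del_result=True
--             for clause in clauses_list:
--                 if (clause not in image):        #remember the position of image that does not has special clause
--                     del_result=False
--                     break
--             if del_result==True:
--                 del_number_hd.append(image_number)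
--     del_number=list(set(del_number_hd))         #del_number has no duplicate
--     del_number.sort()
--     for i in range(len(del_number)):
--         del new_total[del_number[len(del_number)-1-i]]               #the position is in positive sequence, first delete the back one
--     return new_total   #two dimentional list, get the result which not has the positive that satisfy right side
-- ===== SOURCE B (Python) =====
-- import copy
--
-- def get_new_total_list1(result_list, total_list):
--     new_total = copy.deepcopy(total_list)
--     return [image for image in new_total
--             if not any(all(clause in image for clause in clauses_list)
--                        for clauses_list in result_list)]
-- ===== Notes on version B (the rewrite author's own statement) =====
-- stated objective: simpler
-- what changed: Replaces A's four-phase strategy (collect matching indices per clause list, dedupe via set, sort, delete back-to-front by index) with a single filtering pass that keeps each image matching no clause conjunction.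
import Mathlib
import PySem

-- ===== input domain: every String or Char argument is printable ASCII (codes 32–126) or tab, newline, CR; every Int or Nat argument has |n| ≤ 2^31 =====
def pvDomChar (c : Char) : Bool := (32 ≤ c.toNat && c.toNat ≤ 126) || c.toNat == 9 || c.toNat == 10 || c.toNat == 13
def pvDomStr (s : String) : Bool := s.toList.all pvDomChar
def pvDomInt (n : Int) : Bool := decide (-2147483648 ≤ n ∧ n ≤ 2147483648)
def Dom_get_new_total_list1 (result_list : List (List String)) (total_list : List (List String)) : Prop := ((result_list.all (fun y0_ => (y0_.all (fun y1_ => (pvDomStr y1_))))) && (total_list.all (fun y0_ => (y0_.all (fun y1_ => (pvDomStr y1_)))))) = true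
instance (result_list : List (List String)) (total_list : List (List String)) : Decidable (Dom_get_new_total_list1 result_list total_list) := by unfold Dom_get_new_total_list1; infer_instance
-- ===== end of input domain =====

-- B replaces A's index collection + set dedup + sort + back-to-front deletion with a single
-- filtering pass over the list (objective: simpler). Both Pythons return a deep copy of the
-- input list's surviving elements; the equivalence proved here is about the returned value.

-- ===== PORT A =====
-- the inner 'for clause in clauses_list: if clause not in image: del_result=False; break' loop
def pvCheckAll (clauses_list : List String) (image : List String) : Bool :=
  match clauses_list with
  | [] => true
  | clause :: rest => if !(image.contains clause) then false else pvCheckAll rest image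

-- 'del new_total[i]'; the index A computes is always in range, out of range we keep the list
def pvDel {α : Type} (xs : List α) (i : Int) : List α :=
  match PySem.List.pop? xs i with
  | some r => r.2
  | none => xs

def get_new_total_list1 (result_list : List (List String)) (total_list : List (List String)) : List (List String) :=
  let new_total := total_list          -- copy.deepcopy: value-identical
  let del_number_hd : List Int :=
    result_list.foldl (fun hd clauses_list =>
      (PySem.List.enumerate total_list).foldl (fun hd p =>
        if pvCheckAll clauses_list p.2 then hd ++ [p.1] else hd) hd) []
  -- list(set(...)) followed by .sort(): the sorted distinct indices
  let del_number := PySem.List.sorted (PySem.Set.ofList del_number_hd) (fun x => x)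
  (PySem.List.pyRange 0 (PySem.List.len del_number)).foldl
    (fun nt i => pvDel nt (PySem.List.pyGetD del_number (PySem.List.len del_number - 1 - i) 0))
    new_total

-- ===== PORT B =====
def pvMatches (result_list : List (List String)) (image : List String) : Bool :=
  result_list.any (fun clauses_list => clauses_list.all (fun clause => image.contains clause))

def get_new_total_list1_alt (result_list : List (List String)) (total_list : List (List String)) : List (List String) :=
  let new_total := total_list          -- copy.deepcopy: value-identical
  new_total.filter (fun image => !pvMatches result_list image)

-- ===== PRECONDITION & SPEC =====
def Spec_get_new_total_list1 (result_list : List (List String)) (total_list : List (List String)) (out : List (List String)) : Prop := out = get_new_total_list1_alt result_list total_list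
instance (result_list : List (List String)) (total_list : List (List String)) (out : List (List String)) : Decidable (Spec_get_new_total_list1 result_list total_list out) := by unfold Spec_get_new_total_list1; infer_instance

-- ===== CLAIM (what is proved, stated in full; the proofs are below) =====
def Claim_equal_get_new_total_list1 : Prop := ∀ (result_list : List (List String)) (total_list : List (List String)), Dom_get_new_total_list1 result_list total_list → Spec_get_new_total_list1 result_list total_list (get_new_total_list1 result_list total_list)

-- ===== LEMMAS AND PROOFS =====

-- A's break loop is the conjunction over the clause list
theorem pvCheckAll_eq (cls image : List String) :
    pvCheckAll cls image = cls.all (fun c => image.contains c) := by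
  induction cls with
  | nil => rfl
  | cons c rest ih => simp [pvCheckAll, ih]

theorem pvDel_cons_succ {α : Type} (x : α) (t : List α) (k : Nat) :
    pvDel (x :: t) ((k : Int) + 1) = x :: pvDel t (k : Int) := by
  by_cases h : k < t.length
  · have h1 : (k : Int) + 1 = ((k + 1 : Nat) : Int) := by push_cast; ring
    rw [h1, pvDel, pvDel, PySem.List.pop?_natCast _ _ h,
      PySem.List.pop?_natCast _ _ (by simpa using Nat.succ_lt_succ h)]
    simp [List.eraseIdx]
  · have e1 : PySem.List.pop? (x :: t) ((k : Int) + 1) = none := by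
      simp only [PySem.List.pop?, PySem.List.pyIdx?]
      have h2 : ¬ ((k : Int) + 1 < ((x :: t).length : Int)) := by
        simp only [List.length_cons]; push_cast; omega
      rw [if_pos (by positivity), if_neg h2]
      rfl
    have e2 : PySem.List.pop? t (k : Int) = none := by
      simp only [PySem.List.pop?, PySem.List.pyIdx?]
      have h2 : ¬ ((k : Int) < (t.length : Int)) := by omega
      rw [if_pos (by positivity), if_neg h2]
      rfl
    rw [pvDel, pvDel, e1, e2]

-- deleting a shifted index list from (x :: t) keeps the head and deletes the unshifted list from t
theorem pvDel_foldr_shift {α : Type} (ds : List Nat) (x : α) (t : List α) :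
    (ds.map (fun (k : Nat) => (k : Int) + 1)).foldr (fun d nt => pvDel nt d) (x :: t)
      = x :: (ds.map (fun (k : Nat) => (k : Int))).foldr (fun d nt => pvDel nt d) t := by
  induction ds with
  | nil => rfl
  | cons d rest ih => simp only [List.map_cons, List.foldr_cons, ih, pvDel_cons_succ]

-- back-to-front deletion of exactly the indices at which Q holds is filtering by ¬Q
theorem pvDel_foldr_filter {α : Type} (dflt : α) :
    ∀ (xs : List α) (Q : α → Bool),
      (((List.range xs.length).filter (fun k => Q (xs.getD k dflt))).map
          (fun (k : Nat) => (k : Int))).foldr (fun d nt => pvDel nt d) xs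
        = xs.filter (fun a => !Q a) := by
  intro xs
  induction xs with
  | nil => intro Q; rfl
  | cons x t ih =>
    intro Q
    have hr : List.range (x :: t).length = 0 :: (List.range t.length).map (fun k => k + 1) := by
      simp [List.range_succ_eq_map]
    have hshift :
        ((List.range t.length).map (fun k => k + 1)).filter (fun k => Q ((x :: t).getD k dflt))
          = ((List.range t.length).filter (fun k => Q (t.getD k dflt))).map (fun k => k + 1) := by
      rw [List.filter_map]
      rfl
    have hmap :
        (((List.range t.length).filter (fun k => Q (t.getD k dflt))).map (fun k => k + 1)).map
            (fun (k : Nat) => (k : Int))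
          = ((List.range t.length).filter (fun k => Q (t.getD k dflt))).map
              (fun (k : Nat) => (k : Int) + 1) := by
      rw [List.map_map]; apply List.map_congr_left; intro a _; simp
    by_cases hx : Q x
    · rw [hr]
      simp only [List.filter_cons, List.getD_cons_zero, hx, Bool.not_true, reduceIte]
      rw [hshift, List.map_cons, hmap, List.foldr_cons, pvDel_foldr_shift, ih]
      have h0 : pvDel ((x : α) :: t.filter (fun a => !Q a)) ((0 : Nat) : Int)
          = t.filter (fun a => !Q a) := by
        rw [pvDel, PySem.List.pop?_natCast _ _ (by simp)]
        simp
      simpa [hx] using h0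
    · rw [hr]
      simp only [List.filter_cons, List.getD_cons_zero, hx, Bool.not_false, Bool.false_eq_true,
        reduceIte]
      rw [hshift, hmap, pvDel_foldr_shift, ih]

-- A's final loop reads del_number back to front: it is a foldr of deletions over del_number
theorem pvLoop_rev {α : Type} (ds : List Int) (xs : List α) :
    (PySem.List.pyRange 0 (PySem.List.len ds)).foldl
        (fun nt i => pvDel nt (PySem.List.pyGetD ds (PySem.List.len ds - 1 - i) 0)) xs
      = ds.foldr (fun d nt => pvDel nt d) xs := by
  have hcong : ∀ (acc : List α), ∀ i ∈ PySem.List.pyRange 0 (PySem.List.len ds),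
      pvDel acc (PySem.List.pyGetD ds (PySem.List.len ds - 1 - i) 0)
        = pvDel acc (PySem.List.pyGetD ds.reverse i 0) := by
    intro acc i hi
    rw [PySem.List.mem_pyRange_one] at hi
    have hlen : PySem.List.len ds = (ds.length : Int) := rfl
    rw [hlen] at hi ⊢
    obtain ⟨k, rfl⟩ : ∃ k : Nat, i = (k : Int) := ⟨i.toNat, (Int.toNat_of_nonneg hi.1).symm⟩
    have hk : k < ds.length := by exact_mod_cast hi.2
    have h1 : (ds.length : Int) - 1 - (k : Int) = ((ds.length - 1 - k : Nat) : Int) := by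
      omega
    have h2 : ds.length - 1 - k < ds.length := by omega
    rw [h1, PySem.List.pyGetD_natCast, PySem.List.pyGetD_natCast,
      List.getD_eq_getElem _ _ h2, List.getD_eq_getElem _ _ (by simpa using hk),
      List.getElem_reverse]
  rw [PySem.List.foldl_congr_mem _ _ _ _ hcong]
  have hlenrev : PySem.List.len ds = PySem.List.len ds.reverse := by
    simp [PySem.List.len]
  rw [hlenrev]
  rw [PySem.List.foldl_pyRange_pyGetD ds.reverse 0 (fun nt d => pvDel nt d) xs le_rfl]
  simp [List.foldl_reverse]

-- the sorted distinct collected indices, as Nat indices into total_list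
def pvIdxList (result_list total_list : List (List String)) : List Int :=
  ((List.range total_list.length).filter
      (fun k => pvMatches result_list (total_list.getD k []))).map (fun (k : Nat) => (k : Int))

theorem pv_hd_eq (result_list total_list : List (List String)) :
    result_list.foldl (fun hd clauses_list =>
        (PySem.List.enumerate total_list).foldl (fun hd p =>
          if pvCheckAll clauses_list p.2 then hd ++ [p.1] else hd) hd) []
      = result_list.flatMap (fun cls =>
          ((PySem.List.enumerate total_list).filter (fun p => pvCheckAll cls p.2)).map Prod.fst) := by
  simp only [PySem.List.foldl_append_if]
  simpa using PySem.List.foldl_append_eq_flatMap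
    (fun cls => ((PySem.List.enumerate total_list).filter (fun p => pvCheckAll cls p.2)).map Prod.fst)
    result_list []

theorem pv_mem_hd_iff (result_list total_list : List (List String)) (i : Int) :
    i ∈ result_list.flatMap (fun cls =>
        ((PySem.List.enumerate total_list).filter (fun p => pvCheckAll cls p.2)).map Prod.fst)
      ↔ i ∈ pvIdxList result_list total_list := by
  simp only [pvIdxList, List.mem_flatMap, List.mem_map, List.mem_filter,
    PySem.List.mem_enumerate_iff, pvMatches, pvCheckAll_eq, List.any_eq_true, List.mem_range]
  constructor
  · rintro ⟨cls, hcls, ⟨j, v⟩, ⟨⟨k, hk, hkv⟩, hall⟩, rfl⟩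
    obtain ⟨rfl, rfl⟩ : j = (k : Int) ∧ v = total_list[k] := by
      rw [Prod.mk.injEq] at hkv
      simpa using hkv
    exact ⟨k, ⟨hk, ⟨cls, hcls, by rwa [List.getD_eq_getElem _ _ hk]⟩⟩, rfl⟩
  · rintro ⟨k, ⟨hk, cls, hcls, hall⟩, rfl⟩
    refine ⟨cls, hcls, ((k : Int), total_list[k]), ⟨⟨k, hk, by rw [Prod.mk.injEq]; simp⟩, ?_⟩, rfl⟩
    rwa [List.getD_eq_getElem _ _ hk] at hall

theorem pv_sorted_eq (result_list total_list : List (List String)) :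
    PySem.List.sorted
        (PySem.Set.ofList (result_list.flatMap (fun cls =>
          ((PySem.List.enumerate total_list).filter (fun p => pvCheckAll cls p.2)).map Prod.fst)))
        (fun x => x)
      = pvIdxList result_list total_list := by
  apply PySem.List.sorted_eq_of_perm_of_pairwise_lt
  · apply List.perm_of_nodup_nodup_toFinset_eq
    · exact ((List.nodup_range.filter _).map (fun a b => by exact_mod_cast id))
    · exact PySem.Set.nodup_ofList _
    · ext j
      simp only [List.mem_toFinset, PySem.Set.mem_ofList, pv_mem_hd_iff]
  · exact (List.pairwise_lt_range.filter _).map _ (fun a b h => by exact_mod_cast h)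

theorem pv_main_eq (result_list total_list : List (List String)) :
    get_new_total_list1 result_list total_list = get_new_total_list1_alt result_list total_list := by
  show (PySem.List.pyRange 0 _).foldl _ _ = _
  rw [pv_hd_eq, pv_sorted_eq, pvLoop_rev]
  show (((List.range total_list.length).filter
      (fun k => pvMatches result_list (total_list.getD k []))).map
        (fun (k : Nat) => (k : Int))).foldr (fun d nt => pvDel nt d) total_list = _
  rw [pvDel_foldr_filter ([] : List String) total_list (fun image => pvMatches result_list image)]
  rfl

-- ===== VERDICT (by name: the statement is the Claim_ definition above) =====
theorem get_new_total_list1_spec : Claim_equal_get_new_total_list1 := by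
  intro result_list total_list _
  exact pv_main_eq result_list total_list
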